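-- pv_equiv track=rewrite | github.com/mikelpuy/Test | 2 particles - test.py | generate_vector_basis
-- ===== SOURCE A (Python) =====
-- import itertools
--
-- def generate_vector_basis(dimension,particles):
--     basis=[]
--     for combo in itertools.combinations_with_replacement(range(dimension),particles):
--         vector=[0]*dimension
--         for index in combo:
--             vector[index]+=1
--         basis.append(vector)
--     return basis
-- ===== SOURCE B (Python) =====
-- def generate_vector_basis(dimension, particles):
--     # vectors in descending lexicographic order, by recursion on the
--     # position of the first nonzero coordinate
--     if particles <= 0:
--         return [[0] * dimension] if particles == 0 else []
--     basis = []
--     for j in range(dimension):          # j = position of the first nonzero coordinate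
--         for a0 in range(particles, 0, -1):
--             for rest in generate_vector_basis(dimension - j - 1, particles - a0):
--                 basis.append([0] * j + [a0] + rest)
--     return basis
-- ===== Notes on version B (the rewrite author's own statement) =====
-- stated objective: alternative
-- what changed: Replaces the itertools.combinations_with_replacement enumeration plus per-combo counting pass by a direct recursion on the dimension that distributes the particles over the first coordinate in descending order, building each vector directly.
import Mathlib
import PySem

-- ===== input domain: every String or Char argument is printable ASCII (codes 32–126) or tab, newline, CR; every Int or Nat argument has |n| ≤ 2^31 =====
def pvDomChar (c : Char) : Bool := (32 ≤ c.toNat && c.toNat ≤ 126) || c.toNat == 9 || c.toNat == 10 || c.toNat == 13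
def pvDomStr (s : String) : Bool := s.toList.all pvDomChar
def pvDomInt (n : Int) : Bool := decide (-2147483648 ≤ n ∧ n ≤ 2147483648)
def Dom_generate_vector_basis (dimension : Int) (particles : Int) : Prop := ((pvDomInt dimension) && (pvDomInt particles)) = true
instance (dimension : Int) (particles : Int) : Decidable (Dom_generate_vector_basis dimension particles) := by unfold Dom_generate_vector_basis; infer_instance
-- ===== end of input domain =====

-- B replaces the itertools.combinations_with_replacement enumeration + counting pass
-- by a direct recursion on the dimension (alternative decomposition, same output order).

-- ===== PORT A =====
-- itertools.combinations_with_replacement(pool, r): all multisets of size r, as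
-- nondecreasing tuples in lexicographic order (exact transcription of its spec).
def pvCwr : List Int → Nat → List (List Int)
  | _, 0 => [[]]
  | [], _ + 1 => []
  | x :: xs, n + 1 => ((pvCwr (x :: xs) n).map (fun c => x :: c)) ++ pvCwr xs (n + 1)
termination_by pool n => (n, pool.length)

def generate_vector_basis (dimension : Int) (particles : Int) : List (List Int) :=
  (pvCwr (PySem.List.pyRange 0 dimension 1) particles.toNat).foldl
    (fun basis combo =>
      basis ++ [combo.foldl
        (fun vector index =>
          PySem.List.pySetD vector index (PySem.List.pyGetD vector index 0 + 1))
        (List.replicate dimension.toNat 0)])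
    []

-- ===== PORT B =====
-- recursive body of Source B; the dimension parameter (a non-negative count) is a Nat.
-- '.attach' on the j-loop only carries the membership fact needed for termination.
def pvB : Nat → Int → List (List Int)
  | d, p =>
    if p ≤ 0 then (if p = 0 then [List.replicate d 0] else [])
    else
      (PySem.List.pyRange 0 (d : Int) 1).attach.foldl
        (fun basis j =>
          (PySem.List.pyRange p 0 (-1)).foldl
            (fun b a0 =>
              (pvB (d - j.val.toNat - 1) (p - a0)).foldl
                (fun bb rest => bb ++ [List.replicate j.val.toNat 0 ++ a0 :: rest]) b)
            basis)
        []
termination_by d p => d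
decreasing_by
  have hj := PySem.List.mem_pyRange_one.mp j.property
  omega

def generate_vector_basis_alt (dimension : Int) (particles : Int) : List (List Int) :=
  pvB dimension.toNat particles

-- ===== PRECONDITION & SPEC =====
-- Pre_ excludes particles < 0, where A raises ValueError (from combinations_with_replacement).
def Pre_generate_vector_basis (dimension : Int) (particles : Int) : Prop := 0 ≤ particles
instance (dimension : Int) (particles : Int) : Decidable (Pre_generate_vector_basis dimension particles) := by unfold Pre_generate_vector_basis; infer_instance
def pvWitness_generate_vector_basis : Int × Int := (3, 2)

def Spec_generate_vector_basis (dimension : Int) (particles : Int) (out : List (List Int)) : Prop := out = generate_vector_basis_alt dimension particles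
instance (dimension : Int) (particles : Int) (out : List (List Int)) : Decidable (Spec_generate_vector_basis dimension particles out) := by unfold Spec_generate_vector_basis; infer_instance

-- ===== CLAIM (what is proved, stated in full; the proofs are below) =====
def Claim_equal_generate_vector_basis : Prop := ∀ (dimension : Int) (particles : Int), Dom_generate_vector_basis dimension particles → Pre_generate_vector_basis dimension particles → Spec_generate_vector_basis dimension particles (generate_vector_basis dimension particles)

-- ===== LEMMAS AND PROOFS =====

-- proof-layer reference function: distribute the particles over the first
-- coordinate, descending (the common shape both ports are reduced to)
def pvDist : Nat → Int → List (List Int)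
  | 0, p => if p = 0 then [[]] else []
  | d + 1, p =>
    (PySem.List.pyRange p (-1) (-1)).flatMap
      (fun a0 => (pvDist d (p - a0)).map (fun rest => a0 :: rest))

-- every element of a combination comes from the pool
lemma mem_pvCwr {pool : List Int} {n : Nat} {c : List Int}
    (hc : c ∈ pvCwr pool n) {e : Int} (he : e ∈ c) : e ∈ pool := by
  induction pool, n using pvCwr.induct generalizing c with
  | case1 pool => simp [pvCwr] at hc; subst hc; cases he
  | case2 n => simp [pvCwr] at hc
  | case3 x xs n ih1 ih2 =>
    simp [pvCwr] at hc
    rcases hc with ⟨c', hc', rfl⟩ | hc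
    · rcases List.mem_cons.mp he with rfl | he'
      · exact List.mem_cons_self
      · exact ih1 hc' he'
    · exact List.mem_cons_of_mem _ (ih2 hc he)

-- grouping pvCwr on a cons pool by the multiplicity of the head element
lemma pvCwr_cons (x : Int) (xs : List Int) (n : Nat) :
    pvCwr (x :: xs) n =
      (List.range (n + 1)).flatMap
        (fun k => (pvCwr xs k).map (fun c => List.replicate (n - k) x ++ c)) := by
  induction n with
  | zero => simp [pvCwr]
  | succ n ih =>
    rw [show pvCwr (x :: xs) (n + 1)
        = ((pvCwr (x :: xs) n).map (fun c => x :: c)) ++ pvCwr xs (n + 1) from by rw [pvCwr]]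
    rw [ih, List.map_flatMap]
    conv_rhs => rw [List.range_succ, List.flatMap_append]
    congr 1
    · apply List.flatMap_congr
      intro k hk
      rw [List.mem_range] at hk
      rw [List.map_map]
      have hrep : ((fun c : List Int => x :: c) ∘ (fun c => List.replicate (n - k) x ++ c))
          = fun c => List.replicate (n + 1 - k) x ++ c := by
        funext c
        have h1 : n + 1 - k = (n - k) + 1 := by omega
        simp [Function.comp, h1, List.replicate_succ]
      rw [hrep]
    · simp

-- the A-side counting fold computes per-index occurrence counts
lemma buildVec_eq_count (combo : List Int) (v : List Int)
    (h : ∀ e ∈ combo, 0 ≤ e ∧ e < (v.length : Int)) :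
    combo.foldl
        (fun vector index =>
          PySem.List.pySetD vector index (PySem.List.pyGetD vector index 0 + 1)) v
      = (List.range v.length).map (fun j => v.getD j 0 + (combo.count (j : Int) : Int)) := by
  induction combo generalizing v with
  | nil =>
    symm
    simp only [List.foldl_nil, List.count_nil, Nat.cast_zero, add_zero]
    apply List.ext_getElem (by simp)
    intro j h1 h2
    simp [List.getElem?_eq_getElem h2]
  | cons i rest ih =>
    obtain ⟨hi0, hilen⟩ := h i List.mem_cons_self
    have hji : i.toNat < v.length := by omega
    rw [List.foldl_cons]
    have hlen : (PySem.List.pySetD v i (PySem.List.pyGetD v i 0 + 1)).length = v.length := by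
      simp [PySem.List.length_pySetD]
    rw [ih _ (fun e he => by rw [hlen]; exact h e (List.mem_cons_of_mem _ he))]
    rw [hlen]
    apply List.map_congr_left
    intro j hj
    rw [List.mem_range] at hj
    rw [PySem.List.pySetD_of_nonneg _ _ hi0, PySem.List.pyGetD_of_nonneg _ _ hi0]
    rw [List.getD_eq_getElem _ _ (by simpa using hj), List.getD_eq_getElem _ _ hj,
      List.getElem_set]
    by_cases hij : i.toNat = j
    · have hI : i = (j : Int) := by omega
      simp [hI, List.getElem?_eq_getElem hj]
      ring
    · have hI : (j : Int) ≠ i := by omega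
      simp [hij, List.count_cons]
      omega

-- the key correspondence: counting combinations over a strictly increasing pool
-- equals the recursive distribution of particles
lemma cwr_count_eq_altGo (pool : List Int) (hp : pool.Pairwise (· < ·)) (n : Nat) :
    (pvCwr pool n).map (fun c => pool.map (fun j => (c.count j : Int)))
      = pvDist pool.length (n : Int) := by
  induction pool generalizing n with
  | nil =>
    cases n with
    | zero => simp [pvCwr, pvDist]
    | succ k =>
      simp [pvCwr, pvDist]
      omega
  | cons x xs ih =>
    rw [List.pairwise_cons] at hp
    obtain ⟨hx, hp'⟩ := hp
    rw [pvCwr_cons, List.map_flatMap]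
    show _ = pvDist (xs.length + 1) (n : Int)
    rw [show pvDist (xs.length + 1) (n : Int)
        = (PySem.List.pyRange (n : Int) (-1) (-1)).flatMap
            (fun a0 => (pvDist xs.length ((n : Int) - a0)).map (fun rest => a0 :: rest)) from by
          rw [pvDist],
      PySem.List.pyRange_neg_one]
    have h1 : ((n : Int) - (-1)).toNat = n + 1 := by omega
    rw [h1, List.flatMap_map]
    apply List.flatMap_congr
    intro k hk
    rw [List.mem_range] at hk
    have h2 : (n : Int) - ((n : Int) - (k : Int)) = (k : Int) := by ring
    simp only [h2]
    rw [← ih hp']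
    simp only [List.map_map]
    apply List.map_congr_left
    intro c hc
    simp only [Function.comp, List.map_cons]
    congr 1
    · have hxc : c.count x = 0 :=
        List.count_eq_zero.mpr (fun hmem => lt_irrefl x (hx x (mem_pvCwr hc hmem)))
      rw [List.count_append, hxc, List.count_replicate]
      simp
      omega
    · apply List.map_congr_left
      intro j hj
      have hjx : j ≠ x := ne_of_gt (hx j hj)
      rw [List.count_append, List.count_replicate]
      simp [Ne.symm hjx]

-- distributing 0 particles yields the single all-zero vector
lemma pvDist_zero (d : Nat) : pvDist d 0 = [List.replicate d 0] := by
  induction d with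
  | zero => simp [pvDist]
  | succ d ih =>
    rw [show pvDist (d + 1) 0
        = (PySem.List.pyRange 0 (-1) (-1)).flatMap
            (fun a0 => (pvDist d (0 - a0)).map (fun rest => a0 :: rest)) from by rw [pvDist]]
    rw [PySem.List.pyRange_neg_one_cons (by omega), PySem.List.pyRange_neg_one_eq_nil (by omega)]
    simp [ih, List.replicate_succ]

-- the countdown range p,…,1,0 splits off its final 0
lemma pyRange_countdown_split (p : Int) (hp : 0 ≤ p) :
    PySem.List.pyRange p (-1) (-1) = PySem.List.pyRange p 0 (-1) ++ [0] := by
  rw [PySem.List.pyRange_neg_one, PySem.List.pyRange_neg_one]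
  have h1 : (p - (-1)).toNat = p.toNat + 1 := by omega
  have h2 : (p - 0).toNat = p.toNat := by omega
  rw [h1, h2, List.range_succ, List.map_append]
  simp
  omega

-- pvB's loop body, as a flatMap
lemma pvB_flat (d : Nat) (p : Int) (hp : 0 < p) :
    pvB d p =
      (PySem.List.pyRange 0 (d : Int) 1).flatMap
        (fun j =>
          (PySem.List.pyRange p 0 (-1)).flatMap
            (fun a0 =>
              (pvB (d - j.toNat - 1) (p - a0)).map
                (fun rest => List.replicate j.toNat 0 ++ a0 :: rest))) := by
  rw [pvB, if_neg (not_le.mpr hp)]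
  have h1 : ∀ (b : List (List Int)) (jt : Nat) (a0 : Int),
      (pvB (d - jt - 1) (p - a0)).foldl
          (fun bb rest => bb ++ [List.replicate jt 0 ++ a0 :: rest]) b
        = b ++ (pvB (d - jt - 1) (p - a0)).map
            (fun rest => List.replicate jt 0 ++ a0 :: rest) :=
    fun b jt a0 => PySem.List.foldl_append_singleton_eq_map ..
  simp only [h1]
  have h2 : ∀ (basis : List (List Int)) (jt : Nat),
      (PySem.List.pyRange p 0 (-1)).foldl
          (fun b a0 => b ++ (pvB (d - jt - 1) (p - a0)).map
            (fun rest => List.replicate jt 0 ++ a0 :: rest)) basis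
        = basis ++ (PySem.List.pyRange p 0 (-1)).flatMap
            (fun a0 => (pvB (d - jt - 1) (p - a0)).map
              (fun rest => List.replicate jt 0 ++ a0 :: rest)) :=
    fun basis jt => PySem.List.foldl_append_eq_flatMap ..
  simp only [h2]
  rw [PySem.List.foldl_append_eq_flatMap, List.nil_append]
  conv_rhs => rw [← List.attach_map_subtype_val (PySem.List.pyRange 0 (d : Int) 1)]
  rw [List.flatMap_map]

-- the B port computes the first-coordinate-descending distribution
lemma pvB_eq_pvDist (d : Nat) (p : Int) (hp : 0 ≤ p) : pvB d p = pvDist d p := by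
  induction d using Nat.strong_induction_on generalizing p with
  | _ d ih =>
    by_cases hp0 : p = 0
    · subst hp0
      rw [pvB, pvDist_zero]
      norm_num
    · have hppos : 0 < p := lt_of_le_of_ne hp (Ne.symm hp0)
      cases d with
      | zero =>
        rw [pvB_flat 0 p hppos, show ((0 : Nat) : Int) = 0 from rfl,
          PySem.List.pyRange_one_eq_nil (by omega)]
        simp [pvDist, hp0]
      | succ e =>
        rw [pvB_flat (e + 1) p hppos]
        rw [show pvDist (e + 1) p
            = (PySem.List.pyRange p (-1) (-1)).flatMap
                (fun a0 => (pvDist e (p - a0)).map (fun rest => a0 :: rest)) from by rw [pvDist]]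
        rw [pyRange_countdown_split p hp, List.flatMap_append,
          PySem.List.pyRange_one_cons (by omega), List.flatMap_cons]
        congr 1
        · -- head of the j-loop: first nonzero coordinate at position 0
          apply List.flatMap_congr
          intro a0 ha0
          have hm := PySem.List.mem_pyRange_neg_one.mp ha0
          have hie := ih e (by omega) (p - a0) (by omega)
          simp [hie]
        · -- tail of the j-loop: a leading zero in front of every vector of width e
          rw [show [(0 : Int)].flatMap
                (fun a0 => (pvDist e (p - a0)).map (fun rest => a0 :: rest))
              = (pvDist e p).map (fun rest => (0 : Int) :: rest) from by simp]
          rw [← ih e (by omega) p hp, pvB_flat e p hppos, List.map_flatMap]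
          rw [PySem.List.pyRange_one (0 + 1) ((e + 1 : Nat) : Int), PySem.List.pyRange_one 0 (e : Int)]
          have he1 : (((e + 1 : Nat) : Int) - (0 + 1)).toNat = e := by push_cast; omega
          have he0 : ((e : Int) - 0).toNat = e := by omega
          rw [he1, he0, List.flatMap_map, List.flatMap_map]
          apply List.flatMap_congr
          intro k hk
          rw [List.mem_range] at hk
          have h1 : (0 + 1 + (k : Int)).toNat = k + 1 := by omega
          have h0 : (0 + (k : Int)).toNat = k := by omega
          rw [h1, h0, List.map_flatMap]
          apply List.flatMap_congr
          intro a0 ha0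
          rw [List.map_map]
          have harg : e + 1 - (k + 1) - 1 = e - k - 1 := by omega
          rw [harg]
          apply List.map_congr_left
          intro rest hrest
          simp [List.replicate_succ]

-- ===== VERDICT (by name: the statement is the Claim_ definition above) =====
theorem generate_vector_basis_spec : Claim_equal_generate_vector_basis := by
  intro dim p _ hpre
  have hpre' : (0 : Int) ≤ p := hpre
  have hp' : ((p.toNat : Int)) = p := Int.toNat_of_nonneg hpre'
  unfold Spec_generate_vector_basis generate_vector_basis generate_vector_basis_alt
  rw [pvB_eq_pvDist _ _ hpre']
  by_cases hd : dim ≤ 0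
  · rw [PySem.List.pyRange_one_eq_nil hd]
    have hdn : dim.toNat = 0 := by omega
    rw [hdn]
    cases hnp : p.toNat with
    | zero =>
      have hp0 : p = 0 := by omega
      simp [pvCwr, hp0, pvDist]
    | succ k =>
      have hp0 : ¬ p = 0 := by omega
      simp [pvCwr, hp0, pvDist]
  · rw [not_le] at hd
    have hdd : ((dim.toNat : Int)) = dim := Int.toNat_of_nonneg (le_of_lt hd)
    have hpool : PySem.List.pyRange 0 dim 1
        = (List.range dim.toNat).map (fun k : Nat => (k : Int)) := by
      rw [← hdd]; exact PySem.List.pyRange_zero_natCast dim.toNat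
    rw [PySem.List.foldl_append_singleton_eq_map, List.nil_append]
    have hbuild : ∀ combo ∈ pvCwr (PySem.List.pyRange 0 dim 1) p.toNat,
        combo.foldl
            (fun vector index =>
              PySem.List.pySetD vector index (PySem.List.pyGetD vector index 0 + 1))
            (List.replicate dim.toNat 0)
          = (List.range dim.toNat).map (fun j : Nat => (combo.count (j : Int) : Int)) := by
      intro combo hcombo
      rw [buildVec_eq_count combo _ ?_]
      · simp
      · intro e he
        have := (PySem.List.mem_pyRange_one.mp (mem_pvCwr hcombo he))
        constructor
        · exact this.1
        · simp only [List.length_replicate]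
          omega
    rw [List.map_congr_left hbuild]
    have hlen : (PySem.List.pyRange 0 dim 1).length = dim.toNat := by
      rw [PySem.List.length_pyRange_one]; omega
    have hcwr := cwr_count_eq_altGo (PySem.List.pyRange 0 dim 1)
      (PySem.List.pairwise_lt_pyRange_one 0 dim) p.toNat
    rw [hlen, hp'] at hcwr
    rw [← hcwr]
    apply List.map_congr_left
    intro c _
    rw [hpool, List.map_map]
    rfl
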